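-- pv_equiv track=rewrite | github.com/Cheikyadam/alx-interview | 0x00-pascal_triangle/0-pascal_triangle.py | init_triangle
-- ===== SOURCE A (Python) =====
-- def init_triangle(n):
--     triangle = []
--     for j in range(n):
--         row = []
--         for i in range(j+1):
--             if i == 0 or i == j:
--                 row.append(1)
--             else:
--                 row.append(0)
--         triangle.append(row)
--     return triangle
-- ===== SOURCE B (Python) =====
-- def init_triangle(n):
--     return [[1] if j == 0 else [1] + [0] * (j - 1) + [1] for j in range(n)]
-- ===== Notes on version B (the rewrite author's own statement) =====
-- stated objective: simpler
-- what changed: Each row is built in closed form as [1]+[0]*(j-1)+[1] (with [1] for j==0) inside a single comprehension, removing A's inner per-element loop and branch.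
import Mathlib
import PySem

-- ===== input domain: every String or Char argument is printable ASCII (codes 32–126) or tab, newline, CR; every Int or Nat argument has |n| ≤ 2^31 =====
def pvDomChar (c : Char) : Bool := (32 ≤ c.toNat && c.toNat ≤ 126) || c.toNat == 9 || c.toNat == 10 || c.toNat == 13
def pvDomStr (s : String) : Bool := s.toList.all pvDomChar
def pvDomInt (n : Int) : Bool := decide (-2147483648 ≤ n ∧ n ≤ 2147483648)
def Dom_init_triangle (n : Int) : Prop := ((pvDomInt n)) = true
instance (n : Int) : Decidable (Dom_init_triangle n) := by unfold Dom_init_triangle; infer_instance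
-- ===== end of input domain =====

-- B builds each row in closed form ([1]+[0]*(j-1)+[1], [1] for j==0) in one comprehension,
-- removing A's inner per-element loop; objective: simpler.

-- ===== PORT A =====
def init_triangle (n : Int) : List (List Int) :=
  (PySem.List.pyRange 0 n 1).foldl (fun triangle j =>
    triangle ++ [(PySem.List.pyRange 0 (j + 1) 1).foldl
      (fun row i => row ++ [if i = 0 ∨ i = j then (1 : Int) else 0]) []]) []

-- ===== PORT B =====
def init_triangle_alt (n : Int) : List (List Int) :=
  (PySem.List.pyRange 0 n 1).map (fun j =>
    if j = 0 then [(1 : Int)] else [1] ++ PySem.List.pyRepeat [0] (j - 1) ++ [1])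

-- ===== PRECONDITION & SPEC =====
def Spec_init_triangle (n : Int) (out : List (List Int)) : Prop := out = init_triangle_alt n
instance (n : Int) (out : List (List Int)) : Decidable (Spec_init_triangle n out) := by unfold Spec_init_triangle; infer_instance

-- ===== CLAIM (what is proved, stated in full; the proofs are below) =====
def Claim_equal_init_triangle : Prop := ∀ (n : Int), Dom_init_triangle n → Spec_init_triangle n (init_triangle n)

-- ===== LEMMAS AND PROOFS =====

-- A's inner loop over range(j+1) with the edge test, specialised to a Nat bound, step 1 of 2:
lemma row_interior (t : Nat) :
    (List.range (t + 1)).map (fun k => if k = 0 then (1 : Int) else 0) =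
      1 :: List.replicate t 0 := by
  induction t with
  | zero => simp
  | succ s ih =>
    rw [List.range_succ, List.map_append, ih, List.map_singleton]
    simp [List.replicate_succ']

-- step 2 of 2: the full edge-test row in closed form for t ≥ 1
lemma row_closed (s : Nat) :
    (List.range (s + 2)).map (fun k => if k = 0 ∨ k = s + 1 then (1 : Int) else 0) =
      1 :: (List.replicate s 0 ++ [1]) := by
  rw [List.range_succ, List.map_append, List.map_singleton]
  have h : (List.range (s + 1)).map (fun k => if k = 0 ∨ k = s + 1 then (1 : Int) else 0) =
      (List.range (s + 1)).map (fun k => if k = 0 then (1 : Int) else 0) := by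
    apply List.map_congr_left
    intro k hk
    have : k < s + 1 := List.mem_range.mp hk
    have : k ≠ s + 1 := by omega
    simp [this]
  rw [h, row_interior]
  simp

-- A's inner row loop equals B's closed-form row, for 0 ≤ j
lemma row_eq (j : Int) (hj : 0 ≤ j) :
    (PySem.List.pyRange 0 (j + 1) 1).foldl
      (fun row i => row ++ [if i = 0 ∨ i = j then (1 : Int) else 0]) [] =
      (if j = 0 then [(1 : Int)] else [1] ++ PySem.List.pyRepeat [0] (j - 1) ++ [1]) := by
  rw [PySem.List.foldl_append_singleton_eq_map, List.nil_append,
    PySem.List.pyRange_one]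
  obtain ⟨t, rfl⟩ := Int.eq_ofNat_of_zero_le hj
  rcases t with _ | s
  · norm_num
  · have hne : ((s + 1 : Nat) : Int) ≠ 0 := by push_cast; omega
    rw [if_neg hne, PySem.List.pyRepeat_singleton]
    have harg : ((s + 1 : Nat) : Int) + 1 - 0 = ((s + 2 : Nat) : Int) := by push_cast; ring
    rw [harg, Int.toNat_natCast]
    have hrep : (((s + 1 : Nat) : Int) - 1).toNat = s := by omega
    rw [hrep, List.map_map]
    have key : List.map ((fun i => if i = 0 ∨ i = ((s + 1 : Nat) : Int) then (1 : Int) else 0) ∘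
        fun k : Nat => 0 + (k : Int)) (List.range (s + 2)) =
        List.map (fun k => if k = 0 ∨ k = s + 1 then (1 : Int) else 0) (List.range (s + 2)) :=
      List.map_congr_left (by
        intro k _
        simp only [Function.comp_apply, zero_add]
        have h : ((k : Int) = 0 ∨ (k : Int) = ((s + 1 : Nat) : Int)) ↔ (k = 0 ∨ k = s + 1) := by
          push_cast; omega
        rw [if_congr h rfl rfl])
    exact key.trans (by rw [row_closed]; simp)

-- ===== VERDICT (by name: the statement is the Claim_ definition above) =====
theorem init_triangle_spec : Claim_equal_init_triangle := by
  intro n _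
  unfold Spec_init_triangle init_triangle init_triangle_alt
  rw [PySem.List.foldl_append_singleton_eq_map, List.nil_append]
  apply List.map_congr_left
  intro j hj
  have hj0 : 0 ≤ j := (PySem.List.mem_pyRange_one.mp hj).1
  exact row_eq j hj0
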